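-- pv_equiv track=rewrite | github.com/Shwetha-75/CodingProblems-leetcode_-_HackerRank | GreedyAlgorithm/AmazonWarehouse.py | findMinimumPossibleWays
-- ===== SOURCE A (Python) =====
-- def findMinimumPossibleWays(array:list[int],k:int,d:int)->int:
--       operations=0
--       while True:
--             max_index=min_index=0
--             for i in range(len(array)):
--                 if array[i]<array[min_index]:
--                     min_index=i
--                 if array[i]>array[max_index]:
--                     max_index=i
--             current_diff=array[max_index]-array[min_index]
--             if current_diff<d:
--                 return operations
--             p=min(k,current_diff//2)
--             array[max_index]-=p
--             array[min_index]+=p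
--             operations+=1
-- ===== SOURCE B (Python) =====
-- def _insert_sorted(s, x):
--     i = 0
--     while i < len(s) and s[i] <= x:
--         i += 1
--     s.insert(i, x)
--
--
-- def findMinimumPossibleWays(array, k, d):
--     s = sorted(array)
--     operations = 0
--     while True:
--         if s[-1] - s[0] < d:
--             return operations
--         p = min(k, (s[-1] - s[0]) // 2)
--         hi = s.pop()
--         lo = s.pop(0)
--         _insert_sorted(s, lo + p)
--         _insert_sorted(s, hi - p)
--         operations += 1
-- ===== Notes on version B (the rewrite author's own statement) =====
-- stated objective: alternative
-- what changed: B sorts the array once and then maintains a sorted list, popping the two ends and re-inserting the adjusted values in order, instead of A's full index scan for the max/min positions on every iteration.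
-- outside the precondition, e.g. on findMinimumPossibleWays([0, 2], 1, 1): A returns 1, B returns 1
import Mathlib
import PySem

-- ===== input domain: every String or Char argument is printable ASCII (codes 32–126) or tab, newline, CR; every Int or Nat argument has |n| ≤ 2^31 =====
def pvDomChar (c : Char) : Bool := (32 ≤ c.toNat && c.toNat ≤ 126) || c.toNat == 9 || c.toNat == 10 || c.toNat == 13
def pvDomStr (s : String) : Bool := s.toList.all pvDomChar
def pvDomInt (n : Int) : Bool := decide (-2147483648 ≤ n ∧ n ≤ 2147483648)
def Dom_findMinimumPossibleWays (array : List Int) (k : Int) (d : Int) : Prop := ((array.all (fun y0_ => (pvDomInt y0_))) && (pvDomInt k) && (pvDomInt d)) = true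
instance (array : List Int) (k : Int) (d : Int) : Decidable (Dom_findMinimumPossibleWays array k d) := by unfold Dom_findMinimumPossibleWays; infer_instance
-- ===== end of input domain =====

-- B replaces A's per-iteration full scan for the max/min positions by a sorted list maintained across
-- iterations (pop both ends, re-insert the adjusted values in order); equivalence is about the RETURN
-- value only — A mutates its argument in place, B does not.

-- ===== PORT A =====
-- one step of A's inner for-loop over range(len(array)); state = (max_index, min_index)
def pvStep (arr : List Int) (mi : Nat × Nat) (i : Nat) : Nat × Nat :=
  (if arr.getD mi.1 0 < arr.getD i 0 then i else mi.1,
   if arr.getD i 0 < arr.getD mi.2 0 then i else mi.2)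

-- A's inner for-loop: max_index = min_index = 0; for i in range(len(array)): …
def pvScan (arr : List Int) : Nat × Nat :=
  (List.range arr.length).foldl (pvStep arr) (0, 0)

-- fuel for the 'while True': Σ x² + 1 strictly bounds the iteration count on every input admitted by
-- Pre_ below (each transfer lowers Σ x² by at least 2 there); if it ran out the count so far is returned
def pvFuel (array : List Int) : Nat := ((array.map (fun x => x * x)).sum).toNat + 1

-- A's while-loop (indexing an empty array raises IndexError in Python — excluded by Pre_, where getD's default is never used)
def pvLoopA (k d : Int) : Nat → List Int → Int → Int
  | 0, _, ops => ops
  | fuel+1, arr, ops =>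
    if arr.getD (pvScan arr).1 0 - arr.getD (pvScan arr).2 0 < d then ops
    else
      pvLoopA k d fuel
        ((arr.set (pvScan arr).1
            (arr.getD (pvScan arr).1 0 - min k (PySem.Int.floordiv (arr.getD (pvScan arr).1 0 - arr.getD (pvScan arr).2 0) 2))).set (pvScan arr).2
            ((arr.set (pvScan arr).1
               (arr.getD (pvScan arr).1 0 - min k (PySem.Int.floordiv (arr.getD (pvScan arr).1 0 - arr.getD (pvScan arr).2 0) 2))).getD (pvScan arr).2 0
             + min k (PySem.Int.floordiv (arr.getD (pvScan arr).1 0 - arr.getD (pvScan arr).2 0) 2)))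
        (ops + 1)

def findMinimumPossibleWays (array : List Int) (k : Int) (d : Int) : Int :=
  pvLoopA k d (pvFuel array) array 0

-- ===== PORT B =====
-- Source B's _insert_sorted: insert x before the first element exceeding it
def pvInsort (s : List Int) (x : Int) : List Int :=
  match s with
  | [] => [x]
  | y :: t => if x < y then x :: y :: t else y :: pvInsort t x

-- B's while-loop on the sorted list (same fuel discipline as port A; s[-1]/s[0] on the empty list raise in Python — excluded by Pre_)
def pvLoopB (k d : Int) : Nat → List Int → Int → Int
  | 0, _, ops => ops
  | fuel+1, s, ops =>
    if PySem.List.pyGetD s (-1) 0 - PySem.List.pyGetD s 0 0 < d then ops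
    else
      pvLoopB k d fuel
        (pvInsort
          (pvInsort (s.dropLast.drop 1)
            (PySem.List.pyGetD s.dropLast 0 0 + min k (PySem.Int.floordiv (PySem.List.pyGetD s (-1) 0 - PySem.List.pyGetD s 0 0) 2)))
          (PySem.List.pyGetD s (-1) 0 - min k (PySem.Int.floordiv (PySem.List.pyGetD s (-1) 0 - PySem.List.pyGetD s 0 0) 2)))
        (ops + 1)

def findMinimumPossibleWays_alt (array : List Int) (k : Int) (d : Int) : Int :=
  pvLoopB k d (pvFuel array) (PySem.List.sorted array (fun x => x) false) 0

-- ===== PRECONDITION & SPEC =====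
-- Pre_ excludes inputs on which A's while-loop is not guaranteed to terminate: the empty array (IndexError)
-- and parameter ranges (k ≤ 0, or d ≤ 1 while the spread is still ≥ d) in which the transfer step can stop
-- making progress; on a few such inputs (e.g. d = 1 trajectories that happen to reach an all-equal array)
-- A still returns, and B returns the same value there.
def Pre_findMinimumPossibleWays (array : List Int) (k : Int) (d : Int) : Prop :=
  array ≠ [] ∧ ((1 ≤ k ∧ 2 ≤ d) ∨ ∀ x ∈ array, ∀ y ∈ array, x - y < d)

instance (array : List Int) (k : Int) (d : Int) : Decidable (Pre_findMinimumPossibleWays array k d) := by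
  unfold Pre_findMinimumPossibleWays; infer_instance

def pvWitness_findMinimumPossibleWays : List Int × Int × Int := ([1, 5, 3], 1, 2)

def Spec_findMinimumPossibleWays (array : List Int) (k : Int) (d : Int) (out : Int) : Prop := out = findMinimumPossibleWays_alt array k d
instance (array : List Int) (k : Int) (d : Int) (out : Int) : Decidable (Spec_findMinimumPossibleWays array k d out) := by unfold Spec_findMinimumPossibleWays; infer_instance

-- ===== CLAIM (what is proved, stated in full; the proofs are below) =====
def Claim_equal_findMinimumPossibleWays : Prop := ∀ (array : List Int) (k : Int) (d : Int), Dom_findMinimumPossibleWays array k d → Pre_findMinimumPossibleWays array k d → Spec_findMinimumPossibleWays array k d (findMinimumPossibleWays array k d)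

-- ===== LEMMAS AND PROOFS =====

-- A's inner scan: the fold keeps indices in range whose entries bound every entry seen so far
theorem pvScan_aux (arr : List Int) (h : arr ≠ []) (j : Nat) (hj : j ≤ arr.length) :
    ((List.range j).foldl (pvStep arr) (0, 0)).1 < arr.length ∧
    ((List.range j).foldl (pvStep arr) (0, 0)).2 < arr.length ∧
    (∀ i < j, arr.getD i 0 ≤ arr.getD ((List.range j).foldl (pvStep arr) (0, 0)).1 0) ∧
    (∀ i < j, arr.getD ((List.range j).foldl (pvStep arr) (0, 0)).2 0 ≤ arr.getD i 0) := by
  induction j with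
  | zero =>
    simp only [List.range_zero, List.foldl_nil]
    exact ⟨List.length_pos_of_ne_nil h, List.length_pos_of_ne_nil h, by omega, by omega⟩
  | succ j ih =>
    obtain ⟨h1, h2, h3, h4⟩ := ih (by omega)
    rw [List.range_succ, List.foldl_append, List.foldl_cons, List.foldl_nil]
    set prev := (List.range j).foldl (pvStep arr) (0, 0) with hprev
    refine ⟨?_, ?_, ?_, ?_⟩
    · simp only [pvStep]; split <;> omega
    · simp only [pvStep]; split <;> omega
    · intro i hi
      simp only [pvStep]
      by_cases hc : arr.getD prev.1 0 < arr.getD j 0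
      · rw [if_pos hc]
        rcases Nat.lt_succ_iff_lt_or_eq.mp hi with hlt | rfl
        · exact le_trans (h3 i hlt) (le_of_lt hc)
        · exact le_refl _
      · rw [if_neg hc]
        rcases Nat.lt_succ_iff_lt_or_eq.mp hi with hlt | rfl
        · exact h3 i hlt
        · exact not_lt.mp hc
    · intro i hi
      simp only [pvStep]
      by_cases hc : arr.getD j 0 < arr.getD prev.2 0
      · rw [if_pos hc]
        rcases Nat.lt_succ_iff_lt_or_eq.mp hi with hlt | rfl
        · exact le_trans (le_of_lt hc) (h4 i hlt)
        · exact le_refl _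
      · rw [if_neg hc]
        rcases Nat.lt_succ_iff_lt_or_eq.mp hi with hlt | rfl
        · exact h4 i hlt
        · exact not_lt.mp hc

theorem pvScan_spec (arr : List Int) (h : arr ≠ []) :
    (pvScan arr).1 < arr.length ∧ (pvScan arr).2 < arr.length ∧
    (∀ x ∈ arr, x ≤ arr.getD (pvScan arr).1 0) ∧
    (∀ x ∈ arr, arr.getD (pvScan arr).2 0 ≤ x) := by
  obtain ⟨h1, h2, h3, h4⟩ := pvScan_aux arr h arr.length le_rfl
  refine ⟨h1, h2, ?_, ?_⟩ <;> intro x hx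
  · obtain ⟨i, hi, rfl⟩ := List.mem_iff_getElem.mp hx
    rw [← List.getD_eq_getElem arr 0 hi]
    exact h3 i hi
  · obtain ⟨i, hi, rfl⟩ := List.mem_iff_getElem.mp hx
    rw [← List.getD_eq_getElem arr 0 hi]
    exact h4 i hi

-- l.set i x, as a multiset, swaps x in for the element at i
theorem pv_coe_set (l : List Int) (i : Nat) (x : Int) (h : i < l.length) :
    ((l.set i x : List Int) : Multiset Int) = x ::ₘ (↑l : Multiset Int).erase (l.getD i 0) := by
  induction l generalizing i with
  | nil => simp at h
  | cons y t ih =>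
    cases i with
    | zero =>
      simp only [List.set, List.getD_cons_zero, ← Multiset.cons_coe, Multiset.erase_cons_head]
    | succ i =>
      have hlen : i < t.length := by simpa using h
      simp only [List.set, List.getD_cons_succ, ← Multiset.cons_coe]
      rw [ih i hlen]
      by_cases hy : y = t.getD i 0
      · rw [← hy, Multiset.erase_cons_head, Multiset.cons_swap]
        congr 1
        have hmem : y ∈ (↑t : Multiset Int) := by
          rw [Multiset.mem_coe, hy, List.getD_eq_getElem t 0 hlen]
          exact List.getElem_mem hlen
        rw [Multiset.cons_erase hmem]
      · rw [Multiset.erase_cons_tail _ hy, Multiset.cons_swap]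

theorem pvInsort_perm (s : List Int) (x : Int) : (pvInsort s x).Perm (x :: s) := by
  induction s with
  | nil => simp [pvInsort]
  | cons y t ih =>
    simp only [pvInsort]
    split
    · exact List.Perm.refl _
    · exact (List.Perm.cons y ih).trans (List.Perm.swap x y t)

theorem pvInsort_sorted (s : List Int) (x : Int) (hs : s.Pairwise (· ≤ ·)) :
    (pvInsort s x).Pairwise (· ≤ ·) := by
  induction s with
  | nil => simp [pvInsort]
  | cons y t ih =>
    rw [List.pairwise_cons] at hs
    obtain ⟨hy, ht⟩ := hs
    simp only [pvInsort]
    split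
    · rename_i hlt
      rw [List.pairwise_cons]
      refine ⟨?_, List.pairwise_cons.mpr ⟨hy, ht⟩⟩
      intro z hz
      rcases List.mem_cons.mp hz with rfl | hzt
      · exact le_of_lt hlt
      · exact le_trans (le_of_lt hlt) (hy z hzt)
    · rename_i hge
      rw [List.pairwise_cons]
      refine ⟨?_, ih ht⟩
      intro z hz
      rcases List.mem_cons.mp ((pvInsort_perm t x).mem_iff.mp hz) with rfl | hzt
      · exact not_lt.mp hge
      · exact hy z hzt

theorem pv_sorted_le_getLast (s : List Int) :
    s.Pairwise (· ≤ ·) → ∀ (h : s ≠ []) (x : Int), x ∈ s → x ≤ s.getLast h := by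
  induction s with
  | nil => intro _ h; exact absurd rfl h
  | cons y t ih =>
    intro hs h x hx
    rw [List.pairwise_cons] at hs
    cases t with
    | nil =>
      rcases List.mem_cons.mp hx with rfl | hxt
      · simp [List.getLast]
      · simp at hxt
    | cons z u =>
      rw [List.getLast_cons (List.cons_ne_nil z u)]
      rcases List.mem_cons.mp hx with rfl | hxt
      · exact hs.1 _ (List.getLast_mem (List.cons_ne_nil z u))
      · exact ih hs.2 (List.cons_ne_nil z u) x hxt

theorem pv_sorted_head_le (s : List Int) (hs : s.Pairwise (· ≤ ·)) (h : s ≠ []) :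
    ∀ x ∈ s, s.head h ≤ x := by
  cases s with
  | nil => exact absurd rfl h
  | cons y t =>
    intro x hx
    rw [List.pairwise_cons] at hs
    rcases List.mem_cons.mp hx with rfl | hxt
    · exact le_refl _
    · exact hs.1 x hxt

-- the lockstep invariant: with the same fuel, A's loop on arr and B's loop on any sorted
-- rearrangement s of arr return the same count (d ≥ 1 keeps the loop body off degenerate states)
theorem pv_lockstep (k d : Int) (hd : 1 ≤ d) :
    ∀ (fuel : Nat) (arr s : List Int) (ops : Int), arr ≠ [] → arr.Perm s →
      s.Pairwise (· ≤ ·) → pvLoopA k d fuel arr ops = pvLoopB k d fuel s ops := by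
  intro fuel
  induction fuel with
  | zero => intro arr s ops _ _ _; rfl
  | succ fuel ih =>
    intro arr s ops harr hperm hsort
    have hs : s ≠ [] := by
      intro hnil; subst hnil; exact harr hperm.eq_nil
    obtain ⟨hm1, hm2, hmax, hmin⟩ := pvScan_spec arr harr
    have hvmaxmem : arr.getD (pvScan arr).1 0 ∈ arr := by
      rw [List.getD_eq_getElem arr 0 hm1]; exact List.getElem_mem hm1
    have hvminmem : arr.getD (pvScan arr).2 0 ∈ arr := by
      rw [List.getD_eq_getElem arr 0 hm2]; exact List.getElem_mem hm2
    have hhi : PySem.List.pyGetD s (-1) 0 = s.getLast hs := PySem.List.pyGetD_neg_one s 0 hs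
    have hlo : PySem.List.pyGetD s 0 0 = s.head hs := by
      cases s with
      | nil => exact absurd rfl hs
      | cons y t => simp [PySem.List.pyGetD_zero]
    have hvmax : arr.getD (pvScan arr).1 0 = PySem.List.pyGetD s (-1) 0 := by
      rw [hhi]
      exact le_antisymm
        (pv_sorted_le_getLast s hsort hs _ (hperm.mem_iff.mp hvmaxmem))
        (hmax _ (hperm.mem_iff.mpr (List.getLast_mem hs)))
    have hvmin : arr.getD (pvScan arr).2 0 = PySem.List.pyGetD s 0 0 := by
      rw [hlo]
      exact le_antisymm
        (hmin _ (hperm.mem_iff.mpr (List.head_mem hs)))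
        (pv_sorted_head_le s hsort hs _ (hperm.mem_iff.mp hvminmem))
    rw [pvLoopA, pvLoopB, ← hvmax, ← hvmin]
    by_cases hcond : arr.getD (pvScan arr).1 0 - arr.getD (pvScan arr).2 0 < d
    · rw [if_pos hcond, if_pos hcond]
    · rw [if_neg hcond, if_neg hcond]
      -- diff ≥ d ≥ 1: the two extreme values differ
      have hdiff : 1 ≤ arr.getD (pvScan arr).1 0 - arr.getD (pvScan arr).2 0 := by omega
      have hvne : arr.getD (pvScan arr).2 0 ≠ arr.getD (pvScan arr).1 0 := by omega
      have hine : (pvScan arr).1 ≠ (pvScan arr).2 := fun he => hvne (by rw [he])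
      -- p < diff
      have hplt : min k (PySem.Int.floordiv (arr.getD (pvScan arr).1 0 - arr.getD (pvScan arr).2 0) 2)
          < arr.getD (pvScan arr).1 0 - arr.getD (pvScan arr).2 0 := by
        rw [PySem.Int.floordiv_eq_ediv_of_pos (by norm_num)]
        have := min_le_right k ((arr.getD (pvScan arr).1 0 - arr.getD (pvScan arr).2 0) / 2)
        omega
      set p := min k (PySem.Int.floordiv (arr.getD (pvScan arr).1 0 - arr.getD (pvScan arr).2 0) 2) with hp
      -- s has at least two elements: head ≠ getLast
      have hheadne : s.head hs ≠ s.getLast hs := by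
        rw [← hlo, ← hhi, ← hvmax, ← hvmin]; omega
      obtain ⟨a, t, rfl⟩ : ∃ a t, s = a :: t := by
        cases s with
        | nil => exact absurd rfl hs
        | cons a t => exact ⟨a, t, rfl⟩
      obtain ⟨b, u, rfl⟩ : ∃ b u, t = b :: u := by
        cases t with
        | nil => simp [List.getLast] at hheadne
        | cons b u => exact ⟨b, u, rfl⟩
      -- names for the pieces of s
      have htne : (b :: u : List Int) ≠ [] := List.cons_ne_nil b u
      have hgl : (a :: b :: u).getLast hs = (b :: u).getLast htne := List.getLast_cons htne
      have hdl : (a :: b :: u).dropLast = a :: (b :: u).dropLast := by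
        simp [List.dropLast_cons₂]
      -- B's popped lo equals s[0]
      have hlo2 : PySem.List.pyGetD (a :: b :: u).dropLast 0 0 = PySem.List.pyGetD (a :: b :: u) 0 0 := by
        rw [hdl]; simp [PySem.List.pyGetD_zero]
      -- multiset decomposition of s
      have hscoe : ((a :: b :: u : List Int) : Multiset Int)
          = PySem.List.pyGetD (a :: b :: u) (-1) 0 ::ₘ PySem.List.pyGetD (a :: b :: u) 0 0 ::ₘ ↑((a :: b :: u).dropLast.drop 1) := by
        rw [hhi, hlo, hgl, hdl]
        simp only [List.head_cons, List.drop_one, List.tail_cons]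
        have hrec : (b :: u : List Int) = (b :: u).dropLast ++ [(b :: u).getLast htne] :=
          (List.dropLast_append_getLast htne).symm
        calc ((a :: b :: u : List Int) : Multiset Int)
            = ↑(a :: ((b :: u).dropLast ++ [(b :: u).getLast htne])) := by rw [← hrec]
          _ = a ::ₘ ↑((b :: u).dropLast ++ [(b :: u).getLast htne]) := (Multiset.cons_coe _ _).symm
          _ = a ::ₘ ↑((b :: u).getLast htne :: (b :: u).dropLast) :=
              congrArg _ (Multiset.coe_eq_coe.mpr (List.perm_append_singleton _ _))
          _ = a ::ₘ (b :: u).getLast htne ::ₘ ↑(b :: u).dropLast :=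
              congrArg _ (Multiset.cons_coe _ _).symm
          _ = (b :: u).getLast htne ::ₘ a ::ₘ ↑(b :: u).dropLast := Multiset.cons_swap _ _ _
      have hne_aux : arr.length ≠ 0 := by
        intro h0; exact harr (List.eq_nil_of_length_eq_zero h0)
      rw [hlo2, ← hvmin]
      refine ih _ _ _ ?_ ?_ ?_
      · intro h0
        have hl := congrArg List.length h0
        simp only [List.length_set, List.length_nil] at hl
        exact hne_aux hl
      · -- same multiset on both sides
        refine Multiset.coe_eq_coe.mp ?_
        have hm2' : (pvScan arr).2 < (arr.set (pvScan arr).1 (arr.getD (pvScan arr).1 0 - p)).length := by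
          rw [List.length_set]; exact hm2
        have hgd2 : (arr.set (pvScan arr).1 (arr.getD (pvScan arr).1 0 - p)).getD (pvScan arr).2 0
            = arr.getD (pvScan arr).2 0 := by
          rw [List.getD_eq_getElem _ 0 hm2', List.getD_eq_getElem _ 0 hm2]
          simp only [List.getElem_set]
          rw [if_neg hine]
        rw [hgd2]
        have e1 : ((arr.set (pvScan arr).1 (arr.getD (pvScan arr).1 0 - p) : List Int) : Multiset Int)
            = (arr.getD (pvScan arr).1 0 - p) ::ₘ (↑arr : Multiset Int).erase (arr.getD (pvScan arr).1 0) :=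
          pv_coe_set arr _ _ hm1
        have e2 := pv_coe_set (arr.set (pvScan arr).1 (arr.getD (pvScan arr).1 0 - p)) (pvScan arr).2
          ((arr.set (pvScan arr).1 (arr.getD (pvScan arr).1 0 - p)).getD (pvScan arr).2 0 + p) hm2'
        rw [hgd2, e1, Multiset.erase_cons_tail _ (by omega : arr.getD (pvScan arr).1 0 - p ≠ arr.getD (pvScan arr).2 0)] at e2
        have hcoe : (↑arr : Multiset Int) = ↑(a :: b :: u : List Int) := Multiset.coe_eq_coe.mpr hperm
        have e4 : ((↑arr : Multiset Int).erase (arr.getD (pvScan arr).1 0)).erase (arr.getD (pvScan arr).2 0)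
            = ↑((a :: b :: u).dropLast.drop 1) := by
          rw [hcoe, hscoe, ← hvmax, ← hvmin, Multiset.erase_cons_head, Multiset.erase_cons_head]
        have i1 : (↑(pvInsort ((a :: b :: u).dropLast.drop 1) (arr.getD (pvScan arr).2 0 + p)) : Multiset Int)
            = (arr.getD (pvScan arr).2 0 + p) ::ₘ ↑((a :: b :: u).dropLast.drop 1) :=
          (Multiset.coe_eq_coe.mpr (pvInsort_perm _ _)).trans (Multiset.cons_coe _ _).symm
        have i2 : (↑(pvInsort (pvInsort ((a :: b :: u).dropLast.drop 1) (arr.getD (pvScan arr).2 0 + p))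
              (arr.getD (pvScan arr).1 0 - p)) : Multiset Int)
            = (arr.getD (pvScan arr).1 0 - p) ::ₘ (arr.getD (pvScan arr).2 0 + p) ::ₘ ↑((a :: b :: u).dropLast.drop 1) := by
          rw [(Multiset.coe_eq_coe.mpr (pvInsort_perm _ _)).trans (Multiset.cons_coe _ _).symm, i1]
        rw [e2, i2, e4, Multiset.cons_swap]
      · -- B's list stays sorted
        have hsort2 : ((a :: b :: u).dropLast.drop 1).Pairwise (· ≤ ·) := by
          rw [hdl]
          simp only [List.drop_one, List.tail_cons]
          exact List.Pairwise.sublist (List.dropLast_sublist _) (List.pairwise_cons.mp hsort).2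
        exact pvInsort_sorted _ _ (pvInsort_sorted _ _ hsort2)

-- when every pairwise difference is already below d, both loops return at once
theorem pv_immediate (k d : Int) (arr s : List Int) (fuel : Nat) (ops : Int)
    (hne : arr ≠ []) (hperm : arr.Perm s) (himm : ∀ x ∈ arr, ∀ y ∈ arr, x - y < d) :
    pvLoopA k d (fuel+1) arr ops = ops ∧ pvLoopB k d (fuel+1) s ops = ops := by
  have hs : s ≠ [] := by intro hnil; subst hnil; exact hne hperm.eq_nil
  obtain ⟨hm1, hm2, _, _⟩ := pvScan_spec arr hne
  have hvmaxmem : arr.getD (pvScan arr).1 0 ∈ arr := by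
    rw [List.getD_eq_getElem arr 0 hm1]; exact List.getElem_mem hm1
  have hvminmem : arr.getD (pvScan arr).2 0 ∈ arr := by
    rw [List.getD_eq_getElem arr 0 hm2]; exact List.getElem_mem hm2
  constructor
  · rw [pvLoopA, if_pos (himm _ hvmaxmem _ hvminmem)]
  · have hhi : PySem.List.pyGetD s (-1) 0 ∈ s := by
      rw [PySem.List.pyGetD_neg_one s 0 hs]; exact List.getLast_mem hs
    have hlo : PySem.List.pyGetD s 0 0 ∈ s := by
      cases s with
      | nil => exact absurd rfl hs
      | cons y t => simp [PySem.List.pyGetD_zero]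
    rw [pvLoopB, if_pos (himm _ (hperm.mem_iff.mpr hhi) _ (hperm.mem_iff.mpr hlo))]

-- ===== VERDICT (by name: the statement is the Claim_ definition above) =====
theorem findMinimumPossibleWays_spec : Claim_equal_findMinimumPossibleWays := by
  intro array k d _ hpre
  obtain ⟨hne, hcase⟩ := hpre
  unfold Spec_findMinimumPossibleWays findMinimumPossibleWays findMinimumPossibleWays_alt
  have hperm : array.Perm (PySem.List.sorted array (fun x => x) false) :=
    (PySem.List.sorted_perm array (fun x => x) false).symm
  have hsort : (PySem.List.sorted array (fun x => x) false).Pairwise (· ≤ ·) := by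
    simpa using PySem.List.sorted_pairwise array (fun x => x)
  rcases hcase with ⟨hk, hd⟩ | himm
  · exact pv_lockstep k d (by omega) (pvFuel array) array _ 0 hne hperm hsort
  · obtain ⟨hA, hB⟩ := pv_immediate k d array (PySem.List.sorted array (fun x => x) false)
      (((array.map (fun x => x * x)).sum).toNat) 0 hne hperm himm
    simp only [pvFuel]
    rw [hA, hB]
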